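-- pv_equiv track=rewrite | github.com/Dishant2001/Job_Suitability-Resume_Parser_Using_BERT | config.py | token2tags
-- ===== SOURCE A (Python) =====
-- def token2tags(sentences,predictions):
--     entity_dict = {
--         'NAME':[],
--         'CLG':[],
--         'DEG':[],
--         'GRADYEAR':[],
--         'YOE':[],
--         'COMPANY':[],
--         'DESIG':[],
--         'SKILLS':[],
--         'LOC':[],
--         'EMAIL':[]
--     }
--
--     for i in range(1,len(predictions[0])):
--         if predictions[0][i]=='X' and predictions[0][i-1]!='X' and predictions[0][i-1]!='CLS':
--             predictions[0][i] = predictions[0][i-1]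
--
--     for i in entity_dict.keys():
--         for idx,j in enumerate(predictions[0]):
--             if i in j:
--                 entity_dict[i].append(idx)
--     result_dict = {}
--     for i in entity_dict.keys():
--         result_dict[i] = ''
--         for j in entity_dict[i]:
--             result_dict[i]+=sentences[0][j]+' '
--         result_dict[i] = result_dict[i].replace(' ##','')
--     return result_dict
-- ===== SOURCE B (Python) =====
-- def token2tags(sentences, predictions):
--     keys = ['NAME', 'CLG', 'DEG', 'GRADYEAR', 'YOE', 'COMPANY', 'DESIG', 'SKILLS', 'LOC', 'EMAIL']
--
--     # same 'X'-propagation, mutating predictions[0] in place exactly as the original does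
--     toks = predictions[0]
--     for i in range(1, len(toks)):
--         if toks[i] == 'X' and toks[i - 1] != 'X' and toks[i - 1] != 'CLS':
--             toks[i] = toks[i - 1]
--
--     # single pass over the tokens: accumulate each tag's words directly,
--     # no intermediate per-tag index lists
--     result_dict = {k: '' for k in keys}
--     for idx, tok in enumerate(toks):
--         for k in keys:
--             if k in tok:
--                 result_dict[k] += sentences[0][idx] + ' '
--     for k in keys:
--         result_dict[k] = result_dict[k].replace(' ##', '')
--     return result_dict
-- ===== Notes on version B (the rewrite author's own statement) =====
-- stated objective: alternative
-- what changed: Instead of building a per-tag table of matching token indices in ten key-passes and then concatenating words per tag, B makes one pass over the tokens and appends each word directly to its tags' accumulating strings, eliminating the intermediate index table; the X-propagation mutation is kept verbatim.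
import Mathlib
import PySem

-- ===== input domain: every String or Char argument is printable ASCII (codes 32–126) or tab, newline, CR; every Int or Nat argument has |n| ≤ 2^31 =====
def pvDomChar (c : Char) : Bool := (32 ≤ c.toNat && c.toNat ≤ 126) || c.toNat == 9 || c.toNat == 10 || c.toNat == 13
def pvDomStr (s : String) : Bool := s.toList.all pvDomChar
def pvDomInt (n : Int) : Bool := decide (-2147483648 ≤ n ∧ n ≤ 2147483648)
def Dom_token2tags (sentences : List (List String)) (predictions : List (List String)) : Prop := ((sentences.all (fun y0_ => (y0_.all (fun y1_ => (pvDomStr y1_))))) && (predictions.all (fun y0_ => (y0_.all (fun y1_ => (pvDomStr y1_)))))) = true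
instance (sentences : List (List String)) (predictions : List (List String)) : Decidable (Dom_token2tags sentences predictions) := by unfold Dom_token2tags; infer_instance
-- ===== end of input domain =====

-- B groups words per tag in ONE pass over the tokens (no intermediate per-tag index table);
-- the in-place 'X'-propagation mutation of predictions[0] is reproduced verbatim (return-value equivalence).

-- ===== PORT A =====
def token2tags (sentences : List (List String)) (predictions : List (List String)) : List (String × String) :=
  let ed0 : PySem.Dict String (List Int) :=
    (((((((((PySem.Dict.empty.insert "NAME" []).insert "CLG" []).insert "DEG" []).insert
      "GRADYEAR" []).insert "YOE" []).insert "COMPANY" []).insert "DESIG" []).insert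
      "SKILLS" []).insert "LOC" []).insert "EMAIL" []
  let p0 := predictions.headD []
  let p0 := (PySem.List.pyRange 1 (p0.length) 1).foldl (fun l i =>
      if PySem.List.pyGetD l i "" = "X" ∧ PySem.List.pyGetD l (i-1) "" ≠ "X" ∧
          PySem.List.pyGetD l (i-1) "" ≠ "CLS"
      then PySem.List.pySetD l i (PySem.List.pyGetD l (i-1) "") else l) p0
  let ed := ed0.keys.foldl (fun d i =>
      (PySem.List.enumerate p0).foldl (fun d p =>
        if PySem.Str.isIn i p.2 then d.modify i [] (fun v => v ++ [p.1]) else d) d) ed0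
  let rd := ed.keys.foldl (fun d i =>
      d.insert i (PySem.Str.replace
        ((ed.getD i []).foldl (fun s j => s ++ PySem.List.pyGetD (sentences.headD []) j "" ++ " ") "")
        " ##" "")) PySem.Dict.empty
  rd.items

-- ===== PORT B =====
def tagKeys : List String :=
  ["NAME", "CLG", "DEG", "GRADYEAR", "YOE", "COMPANY", "DESIG", "SKILLS", "LOC", "EMAIL"]

def token2tags_alt (sentences : List (List String)) (predictions : List (List String)) : List (String × String) :=
  let toks := predictions.headD []
  let toks := (PySem.List.pyRange 1 (toks.length) 1).foldl (fun l i =>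
      if PySem.List.pyGetD l i "" = "X" ∧ PySem.List.pyGetD l (i-1) "" ≠ "X" ∧
          PySem.List.pyGetD l (i-1) "" ≠ "CLS"
      then PySem.List.pySetD l i (PySem.List.pyGetD l (i-1) "") else l) toks
  let d0 : PySem.Dict String String := tagKeys.foldl (fun d k => d.insert k "") PySem.Dict.empty
  let d1 := (PySem.List.enumerate toks).foldl (fun d p =>
      tagKeys.foldl (fun d k =>
        if PySem.Str.isIn k p.2
        then d.modify k "" (fun s => s ++ PySem.List.pyGetD (sentences.headD []) p.1 "" ++ " ")
        else d) d) d0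
  let d2 := tagKeys.foldl (fun d k => d.insert k (PySem.Str.replace (d.getD k "") " ##" "")) d1
  d2.items

-- ===== PRECONDITION & SPEC =====
-- Pre_ excludes the inputs on which the Python raises IndexError (predictions empty, or a word
-- looked up past the end of sentences[0]); it is slightly conservative: a token that matches no
-- tag (or an 'X' that would not be propagated into a matching tag) at an out-of-range position
-- also falls outside Pre_, although A returns there — see the cite in claim.json.
def Pre_token2tags (sentences : List (List String)) (predictions : List (List String)) : Prop :=
  predictions ≠ [] ∧
  ∀ p ∈ PySem.List.enumerate (predictions.headD []),
    ((∃ k ∈ (["NAME", "CLG", "DEG", "GRADYEAR", "YOE", "COMPANY", "DESIG", "SKILLS", "LOC", "EMAIL"] : List String),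
        PySem.Str.isIn k p.2 = true) ∨ p.2 = "X") →
      p.1 < ((sentences.headD []).length : Int)
instance (sentences : List (List String)) (predictions : List (List String)) : Decidable (Pre_token2tags sentences predictions) := by unfold Pre_token2tags; infer_instance

def pvWitness_token2tags : List (List String) × List (List String) :=
  ([["John", "##ny", "is"]], [["NAME", "X", "O"]])

def Spec_token2tags (sentences : List (List String)) (predictions : List (List String)) (out : List (String × String)) : Prop := out = token2tags_alt sentences predictions
instance (sentences : List (List String)) (predictions : List (List String)) (out : List (String × String)) : Decidable (Spec_token2tags sentences predictions out) := by unfold Spec_token2tags; infer_instance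

-- ===== CLAIM (what is proved, stated in full; the proofs are below) =====
def Claim_equal_token2tags : Prop := ∀ (sentences : List (List String)) (predictions : List (List String)), Dom_token2tags sentences predictions → Pre_token2tags sentences predictions → Spec_token2tags sentences predictions (token2tags sentences predictions)

-- ===== LEMMAS AND PROOFS =====

-- abbreviations for the shared pieces of the two ports (definitionally equal to the inlined code)
def mutOf (p0 : List String) : List String :=
  (PySem.List.pyRange 1 (p0.length) 1).foldl (fun l i =>
      if PySem.List.pyGetD l i "" = "X" ∧ PySem.List.pyGetD l (i-1) "" ≠ "X" ∧
          PySem.List.pyGetD l (i-1) "" ≠ "CLS"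
      then PySem.List.pySetD l i (PySem.List.pyGetD l (i-1) "") else l) p0

def wOf (sentences : List (List String)) (j : Int) : String :=
  PySem.List.pyGetD (sentences.headD []) j ""

def idxsOf (k : String) (L : List (Int × String)) : List Int :=
  (L.filter (fun p => PySem.Str.isIn k p.2)).map (fun p => p.1)

-- ---- A-side loop lemmas ----

lemma foldA_getD (i : String) (L : List (Int × String)) :
    ∀ d : PySem.Dict String (List Int),
    (L.foldl (fun d p => if PySem.Str.isIn i p.2 then d.modify i [] (fun v => v ++ [p.1]) else d) d).getD i []
      = d.getD i [] ++ idxsOf i L := by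
  induction L with
  | nil => intro d; simp [idxsOf]
  | cons p L ih =>
    intro d
    by_cases h : PySem.Str.isIn i p.2
    · simp only [List.foldl_cons, if_pos h]
      rw [ih, PySem.Dict.getD_modify, if_pos rfl]
      unfold idxsOf
      rw [List.filter_cons, if_pos h]
      simp [List.append_assoc]
    · simp only [List.foldl_cons, if_neg h]
      rw [ih]
      unfold idxsOf
      rw [List.filter_cons, if_neg h]

lemma foldA_getD_ne (i k : String) (hk : k ≠ i) (L : List (Int × String)) :
    ∀ d : PySem.Dict String (List Int),
    (L.foldl (fun d p => if PySem.Str.isIn i p.2 then d.modify i [] (fun v => v ++ [p.1]) else d) d).getD k []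
      = d.getD k [] := by
  induction L with
  | nil => intro d; rfl
  | cons p L ih =>
    intro d
    by_cases h : PySem.Str.isIn i p.2
    · simp only [List.foldl_cons, if_pos h]
      rw [ih, PySem.Dict.getD_modify, if_neg hk]
    · simp only [List.foldl_cons, if_neg h]
      exact ih d

lemma foldA_keys (i : String) (L : List (Int × String)) :
    ∀ d : PySem.Dict String (List Int), d.contains i = true →
    (L.foldl (fun d p => if PySem.Str.isIn i p.2 then d.modify i [] (fun v => v ++ [p.1]) else d) d).keys
      = d.keys := by
  induction L with
  | nil => intro d _; rfl
  | cons p L ih =>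
    intro d hc
    by_cases h : PySem.Str.isIn i p.2
    · simp only [List.foldl_cons, if_pos h]
      rw [ih _ (by simp [PySem.Dict.contains_modify, hc])]
      rw [PySem.Dict.keys_modify, PySem.Dict.keys_insert_of_contains _ _ hc]
    · simp only [List.foldl_cons, if_neg h]
      exact ih d hc

lemma outerA_getD_not_mem (L : List (Int × String)) :
    ∀ (ks : List String) (d : PySem.Dict String (List Int)) (k : String), k ∉ ks →
    (ks.foldl (fun d i =>
        L.foldl (fun d p => if PySem.Str.isIn i p.2 then d.modify i [] (fun v => v ++ [p.1]) else d) d) d).getD k []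
      = d.getD k [] := by
  intro ks
  induction ks with
  | nil => intro d k _; rfl
  | cons i ks ih =>
    intro d k hk
    simp only [List.foldl_cons]
    rw [ih _ _ (by simp at hk; exact hk.2)]
    exact foldA_getD_ne i k (by simp at hk; exact hk.1) L d

lemma outerA_getD (L : List (Int × String)) :
    ∀ (ks : List String) (d : PySem.Dict String (List Int)), ks.Nodup →
    ∀ k ∈ ks,
    (ks.foldl (fun d i =>
        L.foldl (fun d p => if PySem.Str.isIn i p.2 then d.modify i [] (fun v => v ++ [p.1]) else d) d) d).getD k []
      = d.getD k [] ++ idxsOf k L := by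
  intro ks
  induction ks with
  | nil => intro d _ k hk; simp at hk
  | cons i ks ih =>
    intro d hnd k hk
    simp only [List.foldl_cons]
    rcases List.mem_cons.mp hk with rfl | hk'
    · rw [outerA_getD_not_mem L ks _ k (List.nodup_cons.mp hnd).1]
      exact foldA_getD k L d
    · rw [ih _ (List.nodup_cons.mp hnd).2 k hk']
      rw [foldA_getD_ne i k (fun h => (List.nodup_cons.mp hnd).1 (h ▸ hk')) L d]

lemma outerA_keys (L : List (Int × String)) :
    ∀ (ks : List String) (d : PySem.Dict String (List Int)), (∀ i ∈ ks, d.contains i = true) →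
    (ks.foldl (fun d i =>
        L.foldl (fun d p => if PySem.Str.isIn i p.2 then d.modify i [] (fun v => v ++ [p.1]) else d) d) d).keys
      = d.keys := by
  intro ks
  induction ks with
  | nil => intro d _; rfl
  | cons i ks ih =>
    intro d hc
    simp only [List.foldl_cons]
    have hkeys := foldA_keys i L d (hc i (by simp))
    rw [ih _ ?_, hkeys]
    intro k hk
    have := hc k (by simp [hk])
    rw [PySem.Dict.contains_iff_mem_keys] at this ⊢
    rw [hkeys]; exact this

-- ---- B-side loop lemmas ----

lemma foldB_getD_not_mem (w : Int → String) (p : Int × String) :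
    ∀ (ks : List String) (d : PySem.Dict String String) (k : String), k ∉ ks →
    (ks.foldl (fun d k' => if PySem.Str.isIn k' p.2 then d.modify k' "" (fun s => s ++ w p.1 ++ " ") else d) d).getD k ""
      = d.getD k "" := by
  intro ks
  induction ks with
  | nil => intro d k _; rfl
  | cons k0 ks ih =>
    intro d k hk
    simp only [List.foldl_cons]
    rw [ih _ _ (by simp at hk; exact hk.2)]
    by_cases h : PySem.Str.isIn k0 p.2
    · rw [if_pos h]
      simp [PySem.Dict.getD_modify, (by simp at hk; exact hk.1 : k ≠ k0)]
    · rw [if_neg h]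

lemma foldB_getD (w : Int → String) (p : Int × String) :
    ∀ (ks : List String) (d : PySem.Dict String String) (k : String), ks.Nodup → k ∈ ks →
    (ks.foldl (fun d k' => if PySem.Str.isIn k' p.2 then d.modify k' "" (fun s => s ++ w p.1 ++ " ") else d) d).getD k ""
      = (if PySem.Str.isIn k p.2 then d.getD k "" ++ w p.1 ++ " " else d.getD k "") := by
  intro ks
  induction ks with
  | nil => intro d k _ hk; simp at hk
  | cons k0 ks ih =>
    intro d k hnd hk
    simp only [List.foldl_cons]
    rcases List.mem_cons.mp hk with rfl | hk'
    · rw [foldB_getD_not_mem w p ks _ k (List.nodup_cons.mp hnd).1]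
      by_cases h : PySem.Str.isIn k p.2
      · rw [if_pos h, if_pos h, PySem.Dict.getD_modify, if_pos rfl]
      · rw [if_neg h, if_neg h]
    · have hne : k ≠ k0 := fun h => (List.nodup_cons.mp hnd).1 (h ▸ hk')
      rw [ih _ k (List.nodup_cons.mp hnd).2 hk']
      by_cases h : PySem.Str.isIn k0 p.2
      · rw [if_pos h, PySem.Dict.getD_modify, if_neg hne]
      · rw [if_neg h]

lemma foldB_keys (w : Int → String) (p : Int × String) :
    ∀ (ks : List String) (d : PySem.Dict String String), (∀ k ∈ ks, d.contains k = true) →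
    (ks.foldl (fun d k' => if PySem.Str.isIn k' p.2 then d.modify k' "" (fun s => s ++ w p.1 ++ " ") else d) d).keys
      = d.keys := by
  intro ks
  induction ks with
  | nil => intro d _; rfl
  | cons k0 ks ih =>
    intro d hc
    simp only [List.foldl_cons]
    by_cases h : PySem.Str.isIn k0 p.2
    · rw [if_pos h]
      have hkeys : (d.modify k0 "" (fun s => s ++ w p.1 ++ " ")).keys = d.keys := by
        rw [PySem.Dict.keys_modify, PySem.Dict.keys_insert_of_contains _ _ (hc k0 (by simp))]
      rw [ih _ ?_, hkeys]
      intro k hk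
      rw [PySem.Dict.contains_iff_mem_keys, hkeys]
      exact (PySem.Dict.contains_iff_mem_keys _ _).mp (hc k (by simp [hk]))
    · rw [if_neg h]
      exact ih d (fun k hk => hc k (by simp [hk]))

lemma tokB_getD (w : Int → String) (ks : List String) (hnd : ks.Nodup) (k : String) (hk : k ∈ ks) :
    ∀ (L : List (Int × String)) (d : PySem.Dict String String),
    (L.foldl (fun d p => ks.foldl (fun d k' => if PySem.Str.isIn k' p.2 then d.modify k' "" (fun s => s ++ w p.1 ++ " ") else d) d) d).getD k ""
      = L.foldl (fun s p => if PySem.Str.isIn k p.2 then s ++ w p.1 ++ " " else s) (d.getD k "") := by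
  intro L
  induction L with
  | nil => intro d; rfl
  | cons p L ih =>
    intro d
    simp only [List.foldl_cons]
    rw [ih, foldB_getD w p ks _ k hnd hk]

lemma tokB_keys (w : Int → String) (ks : List String) :
    ∀ (L : List (Int × String)) (d : PySem.Dict String String), (∀ k ∈ ks, d.contains k = true) →
    (L.foldl (fun d p => ks.foldl (fun d k' => if PySem.Str.isIn k' p.2 then d.modify k' "" (fun s => s ++ w p.1 ++ " ") else d) d) d).keys
      = d.keys := by
  intro L
  induction L with
  | nil => intro d _; rfl
  | cons p L ih =>
    intro d hc
    simp only [List.foldl_cons]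
    have hkeys := foldB_keys w p ks d hc
    rw [ih _ ?_, hkeys]
    intro k hk
    rw [PySem.Dict.contains_iff_mem_keys, hkeys]
    exact (PySem.Dict.contains_iff_mem_keys _ _).mp (hc k hk)

lemma ow_getD_not_mem :
    ∀ (ks : List String) (d : PySem.Dict String String) (k : String), k ∉ ks →
    (ks.foldl (fun d k' => d.insert k' (PySem.Str.replace (d.getD k' "") " ##" "")) d).getD k ""
      = d.getD k "" := by
  intro ks
  induction ks with
  | nil => intro d k _; rfl
  | cons k0 ks ih =>
    intro d k hk
    simp only [List.foldl_cons]
    rw [ih _ _ (by simp at hk; exact hk.2)]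
    simp [PySem.Dict.getD_insert, (by simp at hk; exact hk.1 : k ≠ k0)]

lemma ow_getD :
    ∀ (ks : List String) (d : PySem.Dict String String) (k : String), ks.Nodup → k ∈ ks →
    (ks.foldl (fun d k' => d.insert k' (PySem.Str.replace (d.getD k' "") " ##" "")) d).getD k ""
      = PySem.Str.replace (d.getD k "") " ##" "" := by
  intro ks
  induction ks with
  | nil => intro d k _ hk; simp at hk
  | cons k0 ks ih =>
    intro d k hnd hk
    simp only [List.foldl_cons]
    rcases List.mem_cons.mp hk with rfl | hk'
    · rw [ow_getD_not_mem ks _ k (List.nodup_cons.mp hnd).1]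
      rw [PySem.Dict.getD_insert, if_pos rfl]
    · have hne : k ≠ k0 := fun h => (List.nodup_cons.mp hnd).1 (h ▸ hk')
      rw [ih _ k (List.nodup_cons.mp hnd).2 hk']
      rw [PySem.Dict.getD_insert, if_neg hne]

lemma ow_keys :
    ∀ (ks : List String) (d : PySem.Dict String String), (∀ k ∈ ks, d.contains k = true) →
    (ks.foldl (fun d k' => d.insert k' (PySem.Str.replace (d.getD k' "") " ##" "")) d).keys
      = d.keys := by
  intro ks
  induction ks with
  | nil => intro d _; rfl
  | cons k0 ks ih =>
    intro d hc
    simp only [List.foldl_cons]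
    have hkeys := PySem.Dict.keys_insert_of_contains d (PySem.Str.replace (d.getD k0 "") " ##" "") (hc k0 (by simp))
    rw [ih _ ?_, hkeys]
    intro k hk
    rw [PySem.Dict.contains_iff_mem_keys, hkeys]
    exact (PySem.Dict.contains_iff_mem_keys _ _).mp (hc k (by simp [hk]))

-- a dict with distinct keys is the list of its (key, value) pairs
lemma items_eq_map_keys (d : PySem.Dict String String) (h : d.keys.Nodup) :
    d.items = d.keys.map (fun k => (k, d.getD k "")) := by
  obtain ⟨l⟩ := d
  simp only [PySem.Dict.keys_mk] at h
  induction l with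
  | nil => rfl
  | cons p l ih =>
    obtain ⟨k0, v0⟩ := p
    simp only [List.map_cons] at h
    have hn := List.nodup_cons.mp h
    simp only [PySem.Dict.keys_mk, List.map_cons]
    congr 1
    · have h0 : (PySem.Dict.mk ((k0, v0) :: l) : PySem.Dict String String).getD k0 "" = v0 := by
        simp [PySem.Dict.getD, PySem.Dict.get?_mk_cons]
      rw [h0]
    · have hstep : ∀ k ∈ l.map Prod.fst,
          (k, (PySem.Dict.mk ((k0, v0) :: l) : PySem.Dict String String).getD k "")
            = (k, (PySem.Dict.mk l : PySem.Dict String String).getD k "") := by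
        intro k hk
        have hne : (k0 == k) = false := by
          simp only [beq_eq_false_iff_ne, ne_eq]
          exact fun e => hn.1 (e ▸ hk)
        simp [PySem.Dict.getD, PySem.Dict.get?_mk_cons, hne]
      rw [List.map_congr_left hstep]
      simpa [PySem.Dict.keys_mk] using ih hn.2

-- the '{k: "" for k in keys}' initialisation, lookup side
lemma initB_getD_not_mem :
    ∀ (ks : List String) (d : PySem.Dict String String) (k : String), k ∉ ks →
    (ks.foldl (fun d k' => d.insert k' "") d).getD k "" = d.getD k "" := by
  intro ks
  induction ks with
  | nil => intro d k _; rfl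
  | cons k0 ks ih =>
    intro d k hk
    simp only [List.foldl_cons]
    rw [ih _ _ (by simp at hk; exact hk.2)]
    rw [PySem.Dict.getD_insert, if_neg (by simp at hk; exact hk.1)]


lemma initB_getD :
    ∀ (ks : List String) (d : PySem.Dict String String) (k : String), k ∈ ks →
    (ks.foldl (fun d k' => d.insert k' "") d).getD k "" = "" := by
  intro ks
  induction ks with
  | nil => intro d k hk; simp at hk
  | cons k0 ks ih =>
    intro d k hk
    simp only [List.foldl_cons]
    by_cases hm : k ∈ ks
    · exact ih _ k hm
    · have : k = k0 := by rcases List.mem_cons.mp hk with h | h; exact h; exact absurd h hm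
      subst this
      rw [initB_getD_not_mem ks _ k hm, PySem.Dict.getD_insert, if_pos rfl]

-- interleaved accumulation over all tokens = concatenation over the matching indices
lemma gather_eq (w : Int → String) (k : String) (L : List (Int × String)) :
    L.foldl (fun s p => if PySem.Str.isIn k p.2 then s ++ w p.1 ++ " " else s) ""
      = (idxsOf k L).foldl (fun s j => s ++ w j ++ " ") "" := by
  unfold idxsOf
  rw [List.foldl_map, List.foldl_filter]

-- the whole of port A after the mutation loop, over an arbitrary word function and token list
lemma coreA (w : Int → String) (toks : List String) (ed0 : PySem.Dict String (List Int))
    (hkeys : ed0.keys = tagKeys) (hinit : ∀ k ∈ tagKeys, ed0.getD k [] = []) :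
    (let ed := ed0.keys.foldl (fun d i =>
        (PySem.List.enumerate toks).foldl (fun d p =>
          if PySem.Str.isIn i p.2 then d.modify i [] (fun v => v ++ [p.1]) else d) d) ed0
     (ed.keys.foldl (fun d i =>
        d.insert i (PySem.Str.replace
          ((ed.getD i []).foldl (fun s j => s ++ w j ++ " ") "") " ##" "")) PySem.Dict.empty).items)
      = tagKeys.map (fun k => (k, PySem.Str.replace
          ((idxsOf k (PySem.List.enumerate toks)).foldl (fun s j => s ++ w j ++ " ") "") " ##" "")) := by
  have hnd : tagKeys.Nodup := by decide
  have hcont : ∀ i ∈ ed0.keys, ed0.contains i = true := by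
    intro i hi; rw [PySem.Dict.contains_iff_mem_keys]; exact hi
  set L := PySem.List.enumerate toks with hL
  set ed := ed0.keys.foldl (fun d i =>
      L.foldl (fun d p =>
        if PySem.Str.isIn i p.2 then d.modify i [] (fun v => v ++ [p.1]) else d) d) ed0 with hed
  have hedkeys : ed.keys = tagKeys := by
    rw [hed, outerA_keys L ed0.keys ed0 hcont, hkeys]
  have hedget : ∀ k ∈ tagKeys, ed.getD k [] = idxsOf k L := by
    intro k hk
    rw [hed, outerA_getD L ed0.keys ed0 (by rw [hkeys]; exact hnd) k (by rw [hkeys]; exact hk),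
      hinit k hk, List.nil_append]
  show (ed.keys.foldl (fun d i =>
      d.insert i (PySem.Str.replace
        ((ed.getD i []).foldl (fun s j => s ++ w j ++ " ") "") " ##" "")) PySem.Dict.empty).items = _
  rw [hedkeys]
  have h := PySem.Dict.items_foldl_insert_fresh tagKeys (fun i => i)
      (fun i => PySem.Str.replace ((ed.getD i []).foldl (fun s j => s ++ w j ++ " ") "") " ##" "")
      PySem.Dict.empty (by intro a _; rfl) (by simpa using hnd)
  refine Eq.trans h ?_
  show ([] ++ tagKeys.map (fun i => (i, PySem.Str.replace
      ((ed.getD i []).foldl (fun s j => s ++ w j ++ " ") "") " ##" ""))) = _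
  rw [List.nil_append]
  refine List.map_congr_left ?_
  intro k hk
  rw [hedget k hk]

-- the whole of port B after the mutation loop, over an arbitrary word function and token list
lemma coreB (w : Int → String) (toks : List String) :
    (let d0 : PySem.Dict String String := tagKeys.foldl (fun d k => d.insert k "") PySem.Dict.empty
     let d1 := (PySem.List.enumerate toks).foldl (fun d p =>
        tagKeys.foldl (fun d k =>
          if PySem.Str.isIn k p.2 then d.modify k "" (fun s => s ++ w p.1 ++ " ") else d) d) d0
     (tagKeys.foldl (fun d k => d.insert k (PySem.Str.replace (d.getD k "") " ##" "")) d1).items)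
      = tagKeys.map (fun k => (k, PySem.Str.replace
          ((PySem.List.enumerate toks).foldl
            (fun s p => if PySem.Str.isIn k p.2 then s ++ w p.1 ++ " " else s) "") " ##" "")) := by
  have hnd : tagKeys.Nodup := by decide
  set L := PySem.List.enumerate toks with hL
  set d0 : PySem.Dict String String := tagKeys.foldl (fun d k => d.insert k "") PySem.Dict.empty with hd0
  have hd0items : d0.items = tagKeys.map (fun k => (k, "")) := by
    rw [hd0]
    have h := PySem.Dict.items_foldl_insert_fresh tagKeys (fun k => k) (fun _ => "")
        PySem.Dict.empty (by intro a _; rfl) (by simpa using hnd)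
    refine Eq.trans h ?_
    show ([] ++ tagKeys.map (fun k => ((k : String), ("" : String)))) = _
    rw [List.nil_append]
  have hd0keys : d0.keys = tagKeys := by
    show d0.items.map (fun x => x.1) = tagKeys
    rw [hd0items, List.map_map]
    exact List.map_id tagKeys
  have hd0get : ∀ k ∈ tagKeys, d0.getD k "" = "" := by
    intro k hk
    rw [hd0]; exact initB_getD tagKeys _ k hk
  set d1 := L.foldl (fun d p =>
      tagKeys.foldl (fun d k =>
        if PySem.Str.isIn k p.2 then d.modify k "" (fun s => s ++ w p.1 ++ " ") else d) d) d0 with hd1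
  have hd1keys : d1.keys = tagKeys := by
    rw [hd1, tokB_keys w tagKeys L d0 ?_, hd0keys]
    intro k hk
    rw [PySem.Dict.contains_iff_mem_keys, hd0keys]; exact hk
  have hd1get : ∀ k ∈ tagKeys, d1.getD k ""
      = L.foldl (fun s p => if PySem.Str.isIn k p.2 then s ++ w p.1 ++ " " else s) "" := by
    intro k hk
    rw [hd1, tokB_getD w tagKeys hnd k hk L d0, hd0get k hk]
  set d2 := tagKeys.foldl (fun d k => d.insert k (PySem.Str.replace (d.getD k "") " ##" "")) d1 with hd2
  have hcont1 : ∀ k ∈ tagKeys, d1.contains k = true := by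
    intro k hk
    rw [PySem.Dict.contains_iff_mem_keys, hd1keys]; exact hk
  have hd2keys : d2.keys = tagKeys := by
    rw [hd2, ow_keys tagKeys d1 hcont1, hd1keys]
  have hd2get : ∀ k ∈ tagKeys, d2.getD k "" = PySem.Str.replace (d1.getD k "") " ##" "" := by
    intro k hk
    rw [hd2]; exact ow_getD tagKeys d1 k hnd hk
  rw [items_eq_map_keys d2 (by rw [hd2keys]; exact hnd), hd2keys]
  refine List.map_congr_left ?_
  intro k hk
  rw [hd2get k hk, hd1get k hk]

lemma portA_eq (sentences predictions : List (List String)) :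
    token2tags sentences predictions
      = tagKeys.map (fun k => (k, PySem.Str.replace
          ((idxsOf k (PySem.List.enumerate (mutOf (predictions.headD [])))).foldl
            (fun s j => s ++ wOf sentences j ++ " ") "") " ##" "")) := by
  exact coreA (wOf sentences) (mutOf (predictions.headD []))
    ((((((((((PySem.Dict.empty.insert "NAME" []).insert "CLG" []).insert "DEG" []).insert
      "GRADYEAR" []).insert "YOE" []).insert "COMPANY" []).insert "DESIG" []).insert
      "SKILLS" []).insert "LOC" []).insert "EMAIL" [])
    (by decide) (by decide)

lemma portB_eq (sentences predictions : List (List String)) :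
    token2tags_alt sentences predictions
      = tagKeys.map (fun k => (k, PySem.Str.replace
          ((PySem.List.enumerate (mutOf (predictions.headD []))).foldl
            (fun s p => if PySem.Str.isIn k p.2 then s ++ wOf sentences p.1 ++ " " else s) "") " ##" "")) := by
  exact coreB (wOf sentences) (mutOf (predictions.headD []))

-- ===== VERDICT (by name: the statement is the Claim_ definition above) =====
theorem token2tags_spec : Claim_equal_token2tags := by
  intro sentences predictions _dom _pre
  unfold Spec_token2tags
  rw [portA_eq, portB_eq]
  refine List.map_congr_left ?_
  intro k _
  rw [gather_eq]
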